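-- pv_equiv track=rewrite | github.com/nit-singh/vidscribe | src/ai_lecture_summarizer/tex.py | _parse_summary_to_latex
-- ===== SOURCE A (Python) =====
-- def _latex_escape(text: str) -> str:
-- 	return (
-- 		text.replace("\\", r"\textbackslash{}")
-- 		.replace("%", r"\%")
-- 		.replace("$", r"\$")
-- 		.replace("#", r"\#")
-- 		.replace("_", r"\_")
-- 		.replace("{", r"\{")
-- 		.replace("}", r"\}")
-- 		.replace("~", r"\textasciitilde{}")
-- 		.replace("^", r"\textasciicircum{}")
-- 	)
--
-- def _open_itemize() -> str:
-- 	return "\\begin{itemize}[leftmargin=*]"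
--
-- def _close_itemize() -> str:
-- 	return "\\end{itemize}"
--
-- def _parse_summary_to_latex(summary: str) -> str:
-- 	lines = [l.rstrip() for l in summary.splitlines()]
-- 	out_lines: list[str] = []
-- 	in_list = False
-- 	paragraph_buf: list[str] = []
--
-- 	def flush_paragraph():
-- 		if paragraph_buf:
-- 			out_lines.append(_latex_escape(" ".join(paragraph_buf).strip()))
-- 			out_lines.append("")
-- 			paragraph_buf.clear()
--
-- 	for raw in lines:
-- 		line = raw.strip()
-- 		if not line:
-- 			flush_paragraph()
-- 			continue
-- 		if line.startswith("## "):
-- 			if in_list: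
-- 				out_lines.append(_close_itemize())
-- 				in_list = False
-- 			flush_paragraph()
-- 			out_lines.append(f"\\section{{{_latex_escape(line[3:].strip())}}}")
-- 			continue
-- 		if line.startswith("- ") or line.startswith("* "):
-- 			if not in_list:
-- 				flush_paragraph()
-- 				out_lines.append(_open_itemize())
-- 				in_list = True
-- 			out_lines.append(f"\\item {_latex_escape(line[2:].strip())}")
-- 			continue
-- 		paragraph_buf.append(line)
--
-- 	flush_paragraph()
-- 	if in_list:
-- 		out_lines.append(_close_itemize())
--
-- 	return "\n".join(out_lines)
-- ===== SOURCE B (Python) =====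
-- def _latex_escape(text: str) -> str:
-- 	return (
-- 		text.replace("\\", r"\textbackslash{}")
-- 		.replace("%", r"\%")
-- 		.replace("$", r"\$")
-- 		.replace("#", r"\#")
-- 		.replace("_", r"\_")
-- 		.replace("{", r"\{")
-- 		.replace("}", r"\}")
-- 		.replace("~", r"\textasciitilde{}")
-- 		.replace("^", r"\textasciicircum{}")
-- 	)
--
--
-- def _parse_summary_to_latex(summary: str) -> str:
-- 	# pass 1: group the lines into typed blocks
-- 	done = []   # finished blocks: ('sec', title) | ('list', items) | ('para', lines)
-- 	cur = None  # the still-open block: ('list', items) or ('para', lines)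
-- 	for raw in summary.splitlines():
-- 		line = raw.strip()
-- 		if not line:
-- 			if cur is not None and cur[0] == 'para':
-- 				done.append(cur)
-- 				cur = None
-- 		elif line.startswith('## '):
-- 			if cur is not None:
-- 				done.append(cur)
-- 				cur = None
-- 			done.append(('sec', line[3:].strip()))
-- 		elif line.startswith('- ') or line.startswith('* '):
-- 			if cur is not None and cur[0] == 'list':
-- 				cur = ('list', cur[1] + [line[2:].strip()])
-- 			else:
-- 				if cur is not None:
-- 					done.append(cur)
-- 				cur = ('list', [line[2:].strip()])
-- 		else:
-- 			if cur is not None and cur[0] == 'para':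
-- 				cur = ('para', cur[1] + [line])
-- 			else:
-- 				if cur is not None:
-- 					done.append(cur)
-- 				cur = ('para', [line])
-- 	if cur is not None:
-- 		done.append(cur)
-- 	# pass 2: render the blocks
-- 	out = []
-- 	for b in done:
-- 		if b[0] == 'sec':
-- 			out.append('\\section{%s}' % _latex_escape(b[1]))
-- 		elif b[0] == 'list':
-- 			out.append('\\begin{itemize}[leftmargin=*]')
-- 			out.extend('\\item ' + _latex_escape(i) for i in b[1])
-- 			out.append('\\end{itemize}')
-- 		else:
-- 			out.append(_latex_escape(' '.join(b[1]).strip()))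
-- 			out.append('')
-- 	return '\n'.join(out)
-- ===== Notes on version B (the rewrite author's own statement) =====
-- stated objective: alternative
-- what changed: A's single-pass emitter with a mutable in_list flag and paragraph buffer is replaced by a two-pass design: first group the lines into typed blocks (section / list / paragraph), then render each block to LaTeX.
-- intended difference: On summaries where a plain text line occurs while a bullet list is open (a bullet item precedes it with no section-heading line in between) and that text run does not lead directly into a section heading, A keeps the itemize environment open and dumps the buffered paragraph between or after the item lines (even merging text from both sides of an item into one paragraph), while B closes the list and renders the text as an ordinary paragraph after the itemize ends, which is the intended LaTeX structure. — e.g. on _parse_summary_to_latex("- a\nb"): A returns "\\begin{itemize}[leftmargin=*]\n\\item a\nb\n\n\\end{itemize}", B returns "\\begin{itemize}[leftmargin=*]\n\\item a\n\\end{itemize}\nb\n"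
import Mathlib
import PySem

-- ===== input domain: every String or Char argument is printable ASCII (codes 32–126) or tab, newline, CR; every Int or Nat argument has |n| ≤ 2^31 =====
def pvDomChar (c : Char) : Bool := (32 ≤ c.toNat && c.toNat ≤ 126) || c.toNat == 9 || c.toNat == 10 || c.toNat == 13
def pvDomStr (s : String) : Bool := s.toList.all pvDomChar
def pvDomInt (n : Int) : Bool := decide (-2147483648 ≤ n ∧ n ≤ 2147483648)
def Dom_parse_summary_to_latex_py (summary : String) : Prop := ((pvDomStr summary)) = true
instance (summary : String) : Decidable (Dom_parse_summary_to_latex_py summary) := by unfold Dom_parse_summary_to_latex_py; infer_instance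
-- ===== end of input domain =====

-- B replaces A's single-pass emitter (mutable in_list flag + paragraph buffer) by a two-pass
-- grouping into typed blocks and then rendering them; on the exceptional inputs described at
-- D_parse_summary_to_latex_py below, B's output is the intended fix of A's (see pvDiffWitness_).

-- ===== PORT A =====
-- module helper _latex_escape, used verbatim by both programs
def pvLatexEscape (t : String) : String :=
  PySem.Str.replace (PySem.Str.replace (PySem.Str.replace (PySem.Str.replace (PySem.Str.replace
    (PySem.Str.replace (PySem.Str.replace (PySem.Str.replace (PySem.Str.replace t
      "\\" "\\textbackslash{}") "%" "\\%") "$" "\\$") "#" "\\#") "_" "\\_")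
      "{" "\\{") "}" "\\}") "~" "\\textasciitilde{}") "^" "\\textasciicircum{}"

-- A's inner `flush_paragraph`: returns the new (out_lines, paragraph_buf)
def pvFlushA (out : List String) (buf : List String) : List String × List String :=
  if buf ≠ [] then
    (out ++ [pvLatexEscape (PySem.Str.strip (PySem.Str.join " " buf)), ""], [])
  else (out, buf)

-- one iteration of A's `for raw in lines` loop; state = (out_lines, in_list, paragraph_buf)
def pvStepA (st : List String × Bool × List String) (raw : String) : List String × Bool × List String :=
  let line := PySem.Str.strip raw
  if line = "" then
    ((pvFlushA st.1 st.2.2).1, st.2.1, (pvFlushA st.1 st.2.2).2)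
  else if PySem.Str.startswith line "## " then
    let out1 := if st.2.1 = true then st.1 ++ ["\\end{itemize}"] else st.1
    ((pvFlushA out1 st.2.2).1 ++
       ["\\section{" ++ pvLatexEscape (PySem.Str.strip (PySem.Str.slice line (some 3) none)) ++ "}"],
     false, (pvFlushA out1 st.2.2).2)
  else if (PySem.Str.startswith line "- " || PySem.Str.startswith line "* ") = true then
    if st.2.1 = true then
      (st.1 ++ ["\\item " ++ pvLatexEscape (PySem.Str.strip (PySem.Str.slice line (some 2) none))],
       true, st.2.2)
    else
      ((pvFlushA st.1 st.2.2).1 ++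
         ["\\begin{itemize}[leftmargin=*]",
          "\\item " ++ pvLatexEscape (PySem.Str.strip (PySem.Str.slice line (some 2) none))],
       true, (pvFlushA st.1 st.2.2).2)
  else
    (st.1, st.2.1, st.2.2 ++ [line])

def parse_summary_to_latex_py (summary : String) : String :=
  let lines := (PySem.Str.splitlines summary).map (fun l => PySem.Str.rstrip l)
  let st := lines.foldl pvStepA ([], false, [])
  let out := (pvFlushA st.1 st.2.2).1
  let out := if st.2.1 = true then out ++ ["\\end{itemize}"] else out
  PySem.Str.join "\n" out

-- ===== PORT B =====
-- a typed block of B's first pass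
inductive PvBlock where
  | sec : String → PvBlock
  | list : List String → PvBlock
  | para : List String → PvBlock
deriving DecidableEq, Repr

-- one iteration of B's grouping loop; state = (done blocks, open block)
def pvStepB (st : List PvBlock × Option PvBlock) (raw : String) : List PvBlock × Option PvBlock :=
  let line := PySem.Str.strip raw
  if line = "" then
    match st.2 with
    | some (PvBlock.para ls) => (st.1 ++ [PvBlock.para ls], none)
    | _ => st
  else if PySem.Str.startswith line "## " then
    let done := match st.2 with
      | some c => st.1 ++ [c]
      | none => st.1
    (done ++ [PvBlock.sec (PySem.Str.strip (PySem.Str.slice line (some 3) none))], none)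
  else if (PySem.Str.startswith line "- " || PySem.Str.startswith line "* ") = true then
    let item := PySem.Str.strip (PySem.Str.slice line (some 2) none)
    match st.2 with
    | some (PvBlock.list items) => (st.1, some (PvBlock.list (items ++ [item])))
    | some c => (st.1 ++ [c], some (PvBlock.list [item]))
    | none => (st.1, some (PvBlock.list [item]))
  else
    match st.2 with
    | some (PvBlock.para ls) => (st.1, some (PvBlock.para (ls ++ [line])))
    | some c => (st.1 ++ [c], some (PvBlock.para [line]))
    | none => (st.1, some (PvBlock.para [line]))

-- B's second pass: render one block
def pvRender (b : PvBlock) : List String :=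
  match b with
  | PvBlock.sec t => ["\\section{" ++ pvLatexEscape t ++ "}"]
  | PvBlock.list items =>
      ["\\begin{itemize}[leftmargin=*]"] ++ items.map (fun i => "\\item " ++ pvLatexEscape i) ++
        ["\\end{itemize}"]
  | PvBlock.para ls => [pvLatexEscape (PySem.Str.strip (PySem.Str.join " " ls)), ""]

def parse_summary_to_latex_py_alt (summary : String) : String :=
  let st := (PySem.Str.splitlines summary).foldl pvStepB ([], none)
  let done := match st.2 with
    | some c => st.1 ++ [c]
    | none => st.1
  PySem.Str.join "\n" (done.foldl (fun out b => out ++ pvRender b) [])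

-- ===== PRECONDITION & SPEC =====
-- the class of a (stripped) line, as both programs test it: blank / '## ' heading / list item / plain text
inductive PvCls where
  | blank | sec | item | text
deriving DecidableEq, Repr

def pvClassify (raw : String) : PvCls :=
  if PySem.Chars.strip raw.toList = [] then PvCls.blank
  else if "## ".toList <+: PySem.Chars.strip raw.toList then PvCls.sec
  else if "- ".toList <+: PySem.Chars.strip raw.toList ∨ "* ".toList <+: PySem.Chars.strip raw.toList
    then PvCls.item
  else PvCls.text

-- pvScan il cs = true iff, starting with list-open flag il, some plain-text line occurs while a list
-- is open and its run of text lines is not immediately terminated by a '## ' heading (pvInEp checks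
-- the tail of such a run).  These scan the INPUT's line classes only; they compute no output.
mutual
def pvScan : Bool → List PvCls → Bool
  | _, [] => false
  | il, PvCls.blank :: r => pvScan il r
  | _, PvCls.sec :: r => pvScan false r
  | _, PvCls.item :: r => pvScan true r
  | il, PvCls.text :: r => if il then pvInEp r else pvScan false r
def pvInEp : List PvCls → Bool
  | [] => true
  | PvCls.text :: r => pvInEp r
  | PvCls.sec :: r => pvScan false r
  | PvCls.blank :: _ => true
  | PvCls.item :: _ => true
end

-- On summaries where a plain text line occurs while a bullet list is open (a bullet item precedes it
-- with no section-heading line in between) and that text run does not lead directly into a section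
-- heading, A keeps the itemize environment open and dumps the buffered paragraph between or after the
-- item lines (even merging text from both sides of an item into one paragraph), while B closes the
-- list and renders the text as an ordinary paragraph after the itemize ends, which is the intended
-- LaTeX structure.
def D_parse_summary_to_latex_py (summary : String) : Prop :=
  pvScan false ((PySem.Str.splitlines summary).map pvClassify) = true
instance (summary : String) : Decidable (D_parse_summary_to_latex_py summary) := by
  unfold D_parse_summary_to_latex_py; infer_instance

def Spec_parse_summary_to_latex_py (summary : String) (out : String) : Prop :=
  ¬ D_parse_summary_to_latex_py summary → out = parse_summary_to_latex_py_alt summary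
instance (summary : String) (out : String) : Decidable (Spec_parse_summary_to_latex_py summary out) := by
  unfold Spec_parse_summary_to_latex_py; infer_instance

def pvDiffWitness_parse_summary_to_latex_py : String := "- a\nb"
def pvDiffWitnessOut_parse_summary_to_latex_py : String × String :=
  ("\\begin{itemize}[leftmargin=*]\n\\item a\nb\n\n\\end{itemize}",
   "\\begin{itemize}[leftmargin=*]\n\\item a\n\\end{itemize}\nb\n")

-- ===== CLAIM (what is proved, stated in full; the proofs are below) =====
def Claim_unchanged_parse_summary_to_latex_py : Prop := ∀ (summary : String), Dom_parse_summary_to_latex_py summary → Spec_parse_summary_to_latex_py summary (parse_summary_to_latex_py summary)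
def Claim_changed_parse_summary_to_latex_py : Prop := Dom_parse_summary_to_latex_py (pvDiffWitness_parse_summary_to_latex_py) ∧ D_parse_summary_to_latex_py (pvDiffWitness_parse_summary_to_latex_py) ∧ parse_summary_to_latex_py (pvDiffWitness_parse_summary_to_latex_py) = pvDiffWitnessOut_parse_summary_to_latex_py.1 ∧ parse_summary_to_latex_py_alt (pvDiffWitness_parse_summary_to_latex_py) = pvDiffWitnessOut_parse_summary_to_latex_py.2 ∧ pvDiffWitnessOut_parse_summary_to_latex_py.1 ≠ pvDiffWitnessOut_parse_summary_to_latex_py.2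

def Claim_exact_parse_summary_to_latex_py : Prop := ∀ (summary : String), Dom_parse_summary_to_latex_py summary → D_parse_summary_to_latex_py summary → parse_summary_to_latex_py summary ≠ parse_summary_to_latex_py_alt summary

-- ===== LEMMAS AND PROOFS =====

-- strip (rstrip s) = strip s, so A's pre-pass rstrip is invisible to both step functions
lemma pv_dropWhile_ws_append {p : Char → Bool} (v x : List Char) (hv : ∀ c ∈ v, p c = true) :
    List.dropWhile p (v ++ x) = List.dropWhile p x := by
  induction v with
  | nil => rfl
  | cons c t ih =>
      simp only [List.cons_append, List.dropWhile_cons, hv c (by simp)]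
      exact ih (fun c hc => hv c (by simp [hc]))

lemma pv_rstrip_ws_append (x v : List Char) (hv : ∀ c ∈ v, PySem.Chars.isspace c = true) :
    PySem.Chars.rstrip (x ++ v) = PySem.Chars.rstrip x := by
  simp only [PySem.Chars.rstrip, List.reverse_append]
  rw [pv_dropWhile_ws_append _ _ (fun c hc => hv c (by simpa using hc))]

lemma pv_strip_rstrip (s : String) :
    PySem.Str.strip (PySem.Str.rstrip s) = PySem.Str.strip s := by
  have key : ∀ cs : List Char, PySem.Chars.strip (PySem.Chars.rstrip cs) = PySem.Chars.strip cs := by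
    intro cs
    have hdec : cs = PySem.Chars.rstrip cs ++ (List.takeWhile PySem.Chars.isspace cs.reverse).reverse := by
      simp only [PySem.Chars.rstrip]
      rw [← List.reverse_append, List.takeWhile_append_dropWhile, List.reverse_reverse]
    have hws : ∀ c ∈ (List.takeWhile PySem.Chars.isspace cs.reverse).reverse,
        PySem.Chars.isspace c = true := by
      intro c hc
      exact List.mem_takeWhile_imp (by simpa using hc)
    conv_rhs => rw [hdec]
    simp only [PySem.Chars.strip, PySem.Chars.lstrip]
    rw [List.dropWhile_append]
    by_cases h : List.dropWhile PySem.Chars.isspace (PySem.Chars.rstrip cs) = []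
    · rw [if_pos (by simp [h])]
      rw [h, List.dropWhile_eq_nil_iff.mpr (fun x hx => hws x hx)]
    · rw [if_neg (by simp [h])]
      exact (pv_rstrip_ws_append _ _ hws).symm
  have : (PySem.Str.strip (PySem.Str.rstrip s)).toList = (PySem.Str.strip s).toList := by
    simp [pysem, key]
  exact String.toList_injective this
lemma pvStepA_rstrip (st : List String × Bool × List String) (raw : String) :
    pvStepA st (PySem.Str.rstrip raw) = pvStepA st raw := by
  simp only [pvStepA, pv_strip_rstrip]

-- rendering of a finished block list
def pvR (done : List PvBlock) : List String := done.flatMap pvRender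

lemma pvR_append (d : List PvBlock) (b : PvBlock) : pvR (d ++ [b]) = pvR d ++ pvRender b := by
  simp [pvR]

lemma pvR_append2 (d : List PvBlock) (a b : PvBlock) :
    pvR (d ++ [a, b]) = pvR d ++ pvRender a ++ pvRender b := by
  simp [pvR]

-- the loop invariant tying A's state (out, in_list, buf) to B's state (done, cur)
def pvRel (out : List String) (il : Bool) (buf : List String)
    (done : List PvBlock) (cur : Option PvBlock) : Prop :=
  (il = false ∧ buf = [] ∧ cur = none ∧ pvR done = out)
  ∨ (il = false ∧ buf ≠ [] ∧ cur = some (PvBlock.para buf) ∧ pvR done = out)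
  ∨ (∃ items, il = true ∧ buf = [] ∧ cur = some (PvBlock.list items) ∧
       out = pvR done ++ ["\\begin{itemize}[leftmargin=*]"] ++
         items.map (fun i => "\\item " ++ pvLatexEscape i))
  ∨ (il = true ∧ buf ≠ [] ∧ cur = some (PvBlock.para buf) ∧ pvR done = out ++ ["\\end{itemize}"])

-- A's / B's post-loop finishing steps, as functions of the final states
def pvFinA (st : List String × Bool × List String) : List String :=
  if st.2.1 = true then (pvFlushA st.1 st.2.2).1 ++ ["\\end{itemize}"] else (pvFlushA st.1 st.2.2).1

def pvFinB (st : List PvBlock × Option PvBlock) : List String :=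
  match st.2 with
  | some c => pvR (st.1 ++ [c])
  | none => pvR st.1

-- the scan obligation carried through the induction
def pvCond (il : Bool) (buf : List String) (cs : List PvCls) : Bool :=
  if il = true ∧ buf ≠ [] then pvInEp cs else pvScan il cs

lemma pv_blank_iff (raw : String) :
    PySem.Chars.strip raw.toList = [] ↔ PySem.Str.strip raw = "" := by
  rw [← PySem.Str.toList_strip]
  exact ⟨fun h => String.toList_injective (by simpa using h), fun h => by simp [h]⟩

lemma pv_pref_iff (raw : String) (p : String) :
    p.toList <+: PySem.Chars.strip raw.toList ↔ PySem.Str.startswith (PySem.Str.strip raw) p = true := by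
  rw [← PySem.Str.toList_strip, ← PySem.Chars.startswith_iff, PySem.Str.startswith_eq]

lemma pvFlushA_nil (out : List String) : pvFlushA out [] = (out, []) := by simp [pvFlushA]

lemma pvFlushA_ne (out : List String) {buf : List String} (h : buf ≠ []) :
    pvFlushA out buf =
      (out ++ [pvLatexEscape (PySem.Str.strip (PySem.Str.join " " buf)), ""], []) := by
  simp [pvFlushA, h]

lemma pvMain : ∀ (ls : List String) (out : List String) (il : Bool) (buf : List String)
    (done : List PvBlock) (cur : Option PvBlock),
    pvRel out il buf done cur →
    pvCond il buf (ls.map pvClassify) = false →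
    pvFinA (ls.foldl pvStepA (out, il, buf)) = pvFinB (ls.foldl pvStepB (done, cur)) := by
  intro ls
  induction ls with
  | nil =>
    intro out il buf done cur hrel hcond
    simp only [List.foldl_nil]
    rcases hrel with ⟨hil, hbuf, hcur, hR⟩ | ⟨hil, hbuf, hcur, hR⟩ |
      ⟨items, hil, hbuf, hcur, hout⟩ | ⟨hil, hbuf, hcur, hR⟩
    · subst hil hbuf hcur
      simp [pvFinA, pvFinB, pvFlushA_nil, hR]
    · subst hil hcur
      rw [← hR]
      simp [pvFinA, pvFinB, pvFlushA_ne _ hbuf, pvR, pvRender]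
    · subst hil hbuf hcur
      simp [pvFinA, pvFinB, pvFlushA_nil, pvR, pvRender, hout]
    · subst hil hcur
      simp [pvCond, hbuf, pvInEp] at hcond
  | cons raw rest ih =>
    intro out il buf done cur hrel hcond
    simp only [List.foldl_cons, List.map_cons] at hcond ⊢
    by_cases h1 : PySem.Str.strip raw = ""
    · -- blank line
      have hcls : pvClassify raw = PvCls.blank := by
        unfold pvClassify; rw [if_pos ((pv_blank_iff raw).mpr h1)]
      rw [hcls] at hcond
      rcases hrel with ⟨hil, hbuf, hcur, hR⟩ | ⟨hil, hbuf, hcur, hR⟩ |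
        ⟨items, hil, hbuf, hcur, hout⟩ | ⟨hil, hbuf, hcur, hR⟩
      · subst hil hbuf hcur
        simp only [pvStepA, pvStepB, h1, if_pos, pvFlushA_nil]
        exact ih out false [] done none (Or.inl ⟨rfl, rfl, rfl, hR⟩)
          (by simpa [pvCond, pvScan] using hcond)
      · subst hil hcur
        simp only [pvStepA, pvStepB, h1, if_pos, pvFlushA_ne _ hbuf]
        exact ih _ false [] _ none (Or.inl ⟨rfl, rfl, rfl, by simp [pvR_append, pvR_append2, pvRender, hR]⟩)
          (by simpa [pvCond, pvScan] using hcond)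
      · subst hil hbuf hcur
        simp only [pvStepA, pvStepB, h1, if_pos, pvFlushA_nil]
        exact ih out true [] done (some (PvBlock.list items))
          (Or.inr (Or.inr (Or.inl ⟨items, rfl, rfl, rfl, hout⟩)))
          (by simpa [pvCond, pvScan] using hcond)
      · subst hil hcur
        simp [pvCond, hbuf, pvInEp] at hcond
    · by_cases h2 : PySem.Str.startswith (PySem.Str.strip raw) "## " = true
      · -- '## ' heading
        have hcls : pvClassify raw = PvCls.sec := by
          unfold pvClassify
          rw [if_neg (fun h => h1 ((pv_blank_iff raw).mp h)), if_pos ((pv_pref_iff raw "## ").mpr h2)]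
        rw [hcls] at hcond
        rcases hrel with ⟨hil, hbuf, hcur, hR⟩ | ⟨hil, hbuf, hcur, hR⟩ |
          ⟨items, hil, hbuf, hcur, hout⟩ | ⟨hil, hbuf, hcur, hR⟩
        · subst hil hbuf hcur
          simp only [pvStepA, pvStepB, h1, h2, if_pos, if_neg, if_false, pvFlushA_nil]
          simp only [if_neg (by simp [h1] : ¬ (PySem.Str.strip raw = "")), Bool.false_eq_true,
            if_false, pvFlushA_nil]
          exact ih _ false [] _ none (Or.inl ⟨rfl, rfl, rfl, by simp [pvR_append, pvR_append2, pvRender, hR]⟩)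
            (by simpa [pvCond, pvScan] using hcond)
        · subst hil hcur
          simp only [pvStepA, pvStepB, h1, h2, if_pos, if_neg, if_false, pvFlushA_ne _ hbuf]
          exact ih _ false [] _ none (Or.inl ⟨rfl, rfl, rfl, by simp [pvR_append, pvR_append2, pvRender, hR]⟩)
            (by simpa [pvCond, pvScan] using hcond)
        · subst hil hbuf hcur
          simp only [pvStepA, pvStepB, h1, h2, if_pos, if_neg, if_false, pvFlushA_nil]
          exact ih _ false [] _ none
            (Or.inl ⟨rfl, rfl, rfl, by simp [pvR_append, pvR_append2, pvRender, hout]⟩)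
            (by simpa [pvCond, pvScan] using hcond)
        · subst hil hcur
          simp only [pvStepA, pvStepB, h1, h2, if_pos, if_neg, if_false, pvFlushA_ne _ hbuf]
          exact ih _ false [] _ none (Or.inl ⟨rfl, rfl, rfl, by simp [pvR_append, pvR_append2, pvRender, hR]⟩)
            (by simpa [pvCond, hbuf, pvInEp] using hcond)
      · by_cases h3 : (PySem.Str.startswith (PySem.Str.strip raw) "- " ||
            PySem.Str.startswith (PySem.Str.strip raw) "* ") = true
        · -- list item
          have hcls : pvClassify raw = PvCls.item := by
            unfold pvClassify
            rw [if_neg (fun h => h1 ((pv_blank_iff raw).mp h)),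
              if_neg (fun h => h2 ((pv_pref_iff raw "## ").mp h)),
              if_pos (((Bool.or_eq_true _ _).mp h3).imp (pv_pref_iff raw "- ").mpr
                (pv_pref_iff raw "* ").mpr)]
          rw [hcls] at hcond
          rcases hrel with ⟨hil, hbuf, hcur, hR⟩ | ⟨hil, hbuf, hcur, hR⟩ |
            ⟨items, hil, hbuf, hcur, hout⟩ | ⟨hil, hbuf, hcur, hR⟩
          · subst hil hbuf hcur
            simp only [pvStepA, pvStepB, h1, h2, h3, if_pos, if_neg, if_false, pvFlushA_nil]
            exact ih _ true [] _ (some (PvBlock.list _))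
              (Or.inr (Or.inr (Or.inl ⟨_, rfl, rfl, rfl, by simp [hR]⟩)))
              (by simpa [pvCond, pvScan] using hcond)
          · subst hil hcur
            simp only [pvStepA, pvStepB, h1, h2, h3, if_pos, if_neg, if_false, pvFlushA_ne _ hbuf]
            exact ih _ true [] _ (some (PvBlock.list _))
              (Or.inr (Or.inr (Or.inl ⟨_, rfl, rfl, rfl, by
                simp [pvR_append, pvR_append2, pvRender, hR]⟩)))
              (by simpa [pvCond, pvScan] using hcond)
          · subst hil hbuf hcur
            simp only [pvStepA, pvStepB, h1, h2, h3, if_pos, if_neg, if_false]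
            exact ih _ true [] _ (some (PvBlock.list _))
              (Or.inr (Or.inr (Or.inl ⟨_, rfl, rfl, rfl, by simp [hout]⟩)))
              (by simpa [pvCond, pvScan] using hcond)
          · subst hil hcur
            simp [pvCond, hbuf, pvInEp] at hcond
        · -- plain text line
          have hcls : pvClassify raw = PvCls.text := by
            unfold pvClassify
            rw [if_neg (fun h => h1 ((pv_blank_iff raw).mp h)),
              if_neg (fun h => h2 ((pv_pref_iff raw "## ").mp h)),
              if_neg (fun h => h3 ((Bool.or_eq_true _ _).mpr
                (h.imp (pv_pref_iff raw "- ").mp (pv_pref_iff raw "* ").mp)))]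
          rw [hcls] at hcond
          rcases hrel with ⟨hil, hbuf, hcur, hR⟩ | ⟨hil, hbuf, hcur, hR⟩ |
            ⟨items, hil, hbuf, hcur, hout⟩ | ⟨hil, hbuf, hcur, hR⟩
          · subst hil hbuf hcur
            simp only [pvStepA, pvStepB, h1, h2, h3, if_pos, if_neg, if_false]
            exact ih _ false [PySem.Str.strip raw] _ (some (PvBlock.para _))
              (Or.inr (Or.inl ⟨rfl, by simp, rfl, hR⟩))
              (by simpa [pvCond, pvScan] using hcond)
          · subst hil hcur
            simp only [pvStepA, pvStepB, h1, h2, h3, if_pos, if_neg, if_false]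
            exact ih _ false (buf ++ [PySem.Str.strip raw]) _ (some (PvBlock.para _))
              (Or.inr (Or.inl ⟨rfl, by simp, rfl, hR⟩))
              (by simpa [pvCond, pvScan] using hcond)
          · subst hil hbuf hcur
            simp only [pvStepA, pvStepB, h1, h2, h3, if_pos, if_neg, if_false]
            exact ih _ true [PySem.Str.strip raw] _ (some (PvBlock.para _))
              (Or.inr (Or.inr (Or.inr ⟨rfl, by simp, rfl, by
                simp [pvR_append, pvR_append2, pvRender, hout]⟩)))
              (by simpa [pvCond, pvScan, pvInEp] using hcond)
          · subst hil hcur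
            simp only [pvStepA, pvStepB, h1, h2, h3, if_pos, if_neg, if_false]
            exact ih _ true (buf ++ [PySem.Str.strip raw]) _ (some (PvBlock.para _))
              (Or.inr (Or.inr (Or.inr ⟨rfl, by simp, rfl, hR⟩)))
              (by simpa [pvCond, hbuf, pvInEp] using hcond)

-- ── tightness: A ≠ B everywhere inside D ──────────────────────────────────────
-- newline-freeness of every line both programs ever emit, so that join "\n" is injective

lemma pv_replace_go_single (d : Char) (new : List Char) : ∀ (fuel : Nat) (l acc : List Char),
    l.length ≤ fuel →
    PySem.Chars.replace.go [d] new fuel l acc =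
      acc.reverse ++ l.flatMap (fun c => if c = d then new else [c]) := by
  intro fuel
  induction fuel with
  | zero =>
    intro l acc h
    have : l = [] := List.length_eq_zero_iff.mp (Nat.le_zero.mp h)
    subst this
    simp [PySem.Chars.replace.go]
  | succ n ih =>
    intro l acc h
    cases l with
    | nil => simp [PySem.Chars.replace.go]
    | cons c t =>
      rw [PySem.Chars.replace.go]
      by_cases hc : c = d
      · subst hc
        simp only [List.isPrefixOf, BEq.rfl, Bool.true_and, if_true, List.length_cons,
          List.length_nil, List.drop_succ_cons, List.drop_zero]
        rw [ih t _ (by simpa using h)]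
        simp
      · simp only [List.isPrefixOf, Bool.and_true]
        rw [if_neg (by simp [beq_iff_eq]; exact fun hh => hc hh.symm)]
        rw [ih t _ (by simpa using h)]
        simp [hc]

lemma pv_replace_single (d : Char) (s new : List Char) :
    PySem.Chars.replace s [d] new = s.flatMap (fun c => if c = d then new else [c]) := by
  rw [PySem.Chars.replace]
  simp only [List.isEmpty_cons, Bool.false_eq_true, if_false]
  exact (pv_replace_go_single d new s.length s [] le_rfl).trans (by simp)

lemma pv_replace_single_noNL {s new : List Char} (d : Char) (hs : '\n' ∉ s) (hn : '\n' ∉ new) :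
    '\n' ∉ PySem.Chars.replace s [d] new := by
  rw [pv_replace_single]
  intro hmem
  rcases List.mem_flatMap.mp hmem with ⟨c, hc, hm⟩
  by_cases h : c = d
  · simp [h] at hm; exact hn hm
  · simp [h] at hm; exact hs (hm ▸ hc)

lemma pv_splitlines_go_noNL (isB : Char → Bool) (hb : isB '\n' = true) :
    ∀ (n : Nat) (s cur : List Char) (acc : List (List Char)), s.length ≤ n →
    ('\n' ∉ cur) → (∀ l ∈ acc, '\n' ∉ l) →
    ∀ l ∈ PySem.Chars.splitlines.go isB s cur acc, '\n' ∉ l := by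
  intro n
  induction n with
  | zero =>
    intro s cur acc h hcur hacc l hl
    have : s = [] := List.length_eq_zero_iff.mp (Nat.le_zero.mp h)
    subst this
    rw [PySem.Chars.splitlines.go] at hl
    split at hl
    · exact hacc _ (by simpa using hl)
    · rcases (by simpa using hl : l ∈ acc ∨ l = cur.reverse) with h' | h'
      · exact hacc _ h'
      · subst h'; simpa using hcur
  | succ m ih =>
    intro s cur acc h hcur hacc l hl
    rw [PySem.Chars.splitlines.go.eq_def] at hl
    split at hl
    · split at hl
      · exact hacc _ (by simpa using hl)
      · rcases (by simpa using hl : l ∈ acc ∨ l = cur.reverse) with h' | h'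
        · exact hacc _ h'
        · subst h'; simpa using hcur
    · refine ih _ [] _ (by simp at h ⊢; omega) (by simp) ?_ l hl
      intro l' hl'
      rcases (by simpa using hl' : l' = cur.reverse ∨ l' ∈ acc) with h' | h'
      · subst h'; simpa using hcur
      · exact hacc _ h'
    · rename_i c rest _
      split at hl
      · refine ih _ [] _ (by simp at h ⊢; omega) (by simp) ?_ l hl
        intro l' hl'
        rcases (by simpa using hl' : l' = cur.reverse ∨ l' ∈ acc) with h' | h'
        · subst h'; simpa using hcur
        · exact hacc _ h'
      · rename_i hnb
        refine ih _ (c :: cur) _ (by simp at h ⊢; omega) ?_ hacc l hl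
        intro hmem
        rcases (by simpa using hmem : '\n' = c ∨ '\n' ∈ cur) with h' | h'
        · rw [← h'] at hnb; simp [hb] at hnb
        · exact hcur h'

lemma pv_splitlines_noNL (s : String) : ∀ l ∈ PySem.Str.splitlines s, '\n' ∉ l.toList := by
  intro l hl
  have hmem : l.toList ∈ PySem.Chars.splitlines s.toList := by
    rw [← PySem.Str.splitlines_map_toList]
    exact List.mem_map_of_mem hl
  rw [PySem.Chars.splitlines] at hmem
  exact pv_splitlines_go_noNL _ (by decide) s.toList.length s.toList [] [] le_rfl (by simp)
    (by simp) _ hmem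

lemma pv_esc_noNL {t : String} (h : '\n' ∉ t.toList) : '\n' ∉ (pvLatexEscape t).toList := by
  unfold pvLatexEscape
  simp only [PySem.Str.toList_replace]
  exact pv_replace_single_noNL '^'
    (pv_replace_single_noNL '~'
      (pv_replace_single_noNL '}'
        (pv_replace_single_noNL '{'
          (pv_replace_single_noNL '_'
            (pv_replace_single_noNL '#'
              (pv_replace_single_noNL '$'
                (pv_replace_single_noNL '%'
                  (pv_replace_single_noNL '\\' h (by decide)) (by decide)) (by decide))
              (by decide)) (by decide)) (by decide)) (by decide)) (by decide)) (by decide)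

lemma pv_mem_strip {c : Char} {l : List Char} (h : c ∈ PySem.Chars.strip l) : c ∈ l := by
  unfold PySem.Chars.strip PySem.Chars.rstrip PySem.Chars.lstrip at h
  rw [List.mem_reverse] at h
  have h1 := (List.dropWhile_sublist _).mem h
  rw [List.mem_reverse] at h1
  exact (List.dropWhile_sublist _).mem h1

lemma pv_strip_noNL {l : String} (h : '\n' ∉ l.toList) : '\n' ∉ (PySem.Str.strip l).toList := by
  rw [PySem.Str.toList_strip]
  exact fun hmem => h (pv_mem_strip hmem)

lemma pv_slice_noNL {l : String} (k : Nat) (h : '\n' ∉ l.toList) :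
    '\n' ∉ (PySem.Str.slice l (some (k : Int)) none).toList := by
  rw [PySem.Str.toList_slice]
  simp only [PySem.Chars.slice_eq_listSlice]
  rw [PySem.List.slice_from _ (by positivity : (0:Int) ≤ (k : Int))]
  exact fun hmem => h (List.mem_of_mem_drop hmem)

lemma pv_mem_intersperse {α : Type} {sep a : α} : ∀ {l : List α}, a ∈ l.intersperse sep → a ∈ l ∨ a = sep := by
  intro l
  induction l with
  | nil => intro h; simp at h
  | cons x t ih =>
    cases t with
    | nil => intro h; simp at h; simp [h]
    | cons y u =>
      intro h
      rw [List.intersperse_cons₂] at h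
      rcases List.mem_cons.mp h with h | h
      · exact Or.inl (by simp [h])
      · rcases List.mem_cons.mp h with h | h
        · exact Or.inr h
        · rcases ih h with h' | h'
          · exact Or.inl (List.mem_cons_of_mem _ h')
          · exact Or.inr h'

lemma pv_join_space_noNL {bufs : List String} (h : ∀ l ∈ bufs, '\n' ∉ l.toList) :
    '\n' ∉ (PySem.Str.join " " bufs).toList := by
  rw [PySem.Str.toList_join]
  show '\n' ∉ List.intercalate " ".toList (bufs.map String.toList)
  rw [List.intercalate]
  intro hmem
  rcases List.mem_flatten.mp hmem with ⟨l, hl, hm⟩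
  rcases pv_mem_intersperse hl with h' | h'
  · rcases List.mem_map.mp h' with ⟨a, ha, rfl⟩
    exact h a ha hm
  · subst h'; simp at hm

-- every line either program ever emits is newline-free
def pvOK (xs : List String) : Prop := ∀ l ∈ xs, '\n' ∉ l.toList

lemma pvOK_append {xs ys : List String} (hx : pvOK xs) (hy : pvOK ys) : pvOK (xs ++ ys) := by
  intro l hl
  rcases List.mem_append.mp hl with h | h
  · exact hx l h
  · exact hy l h

lemma pvFlushA_OK {out buf : List String} (h1 : pvOK out) (h2 : pvOK buf) :
    pvOK (pvFlushA out buf).1 ∧ pvOK (pvFlushA out buf).2 := by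
  unfold pvFlushA
  split
  · refine ⟨pvOK_append h1 ?_, by intro l hl; simp at hl⟩
    intro l hl
    rcases (by simpa using hl : l = pvLatexEscape (PySem.Str.strip (PySem.Str.join " " buf)) ∨ l = "") with h | h
    · subst h; exact pv_esc_noNL (pv_strip_noNL (pv_join_space_noNL h2))
    · subst h; simp
  · exact ⟨h1, h2⟩

lemma pv_sec_noNL {line : String} (h : '\n' ∉ line.toList) :
    '\n' ∉ ("\\section{" ++ pvLatexEscape (PySem.Str.strip (PySem.Str.slice line (some 3) none)) ++ "}").toList := by
  simp only [String.toList_append]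
  intro hmem
  rcases List.mem_append.mp hmem with hm | hm
  · rcases List.mem_append.mp hm with hm' | hm'
    · revert hm'; decide
    · exact pv_esc_noNL (pv_strip_noNL (pv_slice_noNL 3 h)) hm'
  · revert hm; decide

lemma pv_item_noNL {line : String} (h : '\n' ∉ line.toList) :
    '\n' ∉ ("\\item " ++ pvLatexEscape (PySem.Str.strip (PySem.Str.slice line (some 2) none))).toList := by
  simp only [String.toList_append]
  intro hmem
  rcases List.mem_append.mp hmem with hm | hm
  · revert hm; decide
  · exact pv_esc_noNL (pv_strip_noNL (pv_slice_noNL 2 h)) hm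

lemma pvStepA_OK {o bf : List String} {il : Bool} {raw : String}
    (h1 : pvOK o) (h2 : pvOK bf) (hr : '\n' ∉ raw.toList) :
    pvOK (pvStepA (o, il, bf) raw).1 ∧ pvOK (pvStepA (o, il, bf) raw).2.2 := by
  have hline : '\n' ∉ (PySem.Str.strip raw).toList := pv_strip_noNL hr
  have hsec : pvOK ["\\section{" ++ pvLatexEscape (PySem.Str.strip (PySem.Str.slice (PySem.Str.strip raw) (some 3) none)) ++ "}"] := by
    intro l hl
    rcases (by simpa using hl : l = "\\section{" ++ pvLatexEscape (PySem.Str.strip (PySem.Str.slice (PySem.Str.strip raw) (some 3) none)) ++ "}") with h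
    subst h; exact pv_sec_noNL hline
  have hitm : '\n' ∉ ("\\item " ++ pvLatexEscape (PySem.Str.strip (PySem.Str.slice (PySem.Str.strip raw) (some 2) none))).toList :=
    pv_item_noNL hline
  by_cases hb1 : PySem.Str.strip raw = ""
  · simp only [pvStepA, hb1, if_pos]
    exact ⟨(pvFlushA_OK h1 h2).1, (pvFlushA_OK h1 h2).2⟩
  · by_cases hb2 : PySem.Str.startswith (PySem.Str.strip raw) "## " = true
    · simp only [pvStepA, hb1, hb2, if_pos, if_neg, if_false]
      have h1' : pvOK (if il = true then o ++ ["\\end{itemize}"] else o) := by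
        split
        · exact pvOK_append h1 (by intro l hl; simp at hl; subst hl; decide)
        · exact h1
      exact ⟨pvOK_append (pvFlushA_OK h1' h2).1 hsec, (pvFlushA_OK h1' h2).2⟩
    · by_cases hb3 : (PySem.Str.startswith (PySem.Str.strip raw) "- " ||
          PySem.Str.startswith (PySem.Str.strip raw) "* ") = true
      · cases il with
        | true =>
          simp only [pvStepA, hb1, hb2, hb3, if_pos, if_neg, if_false, if_true]
          refine ⟨pvOK_append h1 ?_, h2⟩
          intro l hl
          rcases (by simpa using hl :
            l = "\\item " ++ pvLatexEscape (PySem.Str.strip (PySem.Str.slice (PySem.Str.strip raw) (some 2) none))) with h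
          subst h; exact hitm
        | false =>
          simp only [pvStepA, hb1, hb2, hb3, if_pos, if_neg, if_false, Bool.false_eq_true]
          refine ⟨pvOK_append (pvFlushA_OK h1 h2).1 ?_, (pvFlushA_OK h1 h2).2⟩
          intro l hl
          rcases (by simpa using hl :
            l = "\\begin{itemize}[leftmargin=*]" ∨
            l = "\\item " ++ pvLatexEscape (PySem.Str.strip (PySem.Str.slice (PySem.Str.strip raw) (some 2) none))) with h | h
          · subst h; decide
          · subst h; exact hitm
      · simp only [pvStepA, hb1, hb2, hb3, if_neg, if_false]
        refine ⟨h1, ?_⟩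
        intro l hl
        rcases (by simpa using hl : l ∈ bf ∨ l = PySem.Str.strip raw) with h | h
        · exact h2 l h
        · subst h; exact hline

lemma pvA_finOK : ∀ (ls : List String) (st : List String × Bool × List String),
    pvOK st.1 → pvOK st.2.2 → (∀ l ∈ ls, '\n' ∉ l.toList) →
    pvOK (pvFinA (ls.foldl pvStepA st)) := by
  intro ls
  induction ls with
  | nil =>
    intro st h1 h2 _
    simp only [List.foldl_nil]
    unfold pvFinA
    split
    · exact pvOK_append (pvFlushA_OK h1 h2).1 (by intro l hl; simp at hl; subst hl; decide)
    · exact (pvFlushA_OK h1 h2).1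
  | cons raw rest ih =>
    intro st h1 h2 hls
    obtain ⟨o, il, bf⟩ := st
    simp only [List.foldl_cons]
    exact ih _ (pvStepA_OK h1 h2 (hls raw (by simp))).1 (pvStepA_OK h1 h2 (hls raw (by simp))).2
      (fun l hl => hls l (by simp [hl]))

-- the newline-free contents of an open block
def pvCurOK : Option PvBlock → Prop
  | none => True
  | some (PvBlock.sec t) => '\n' ∉ t.toList
  | some (PvBlock.list its) => ∀ l ∈ its, '\n' ∉ l.toList
  | some (PvBlock.para ls) => ∀ l ∈ ls, '\n' ∉ l.toList

lemma pvRender_OK {c : PvBlock} (h : pvCurOK (some c)) : pvOK (pvRender c) := by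
  cases c with
  | sec t =>
    intro l hl
    rcases (by simpa [pvRender] using hl : l = "\\section{" ++ pvLatexEscape t ++ "}") with h'
    subst h'
    simp only [String.toList_append]
    intro hmem
    rcases List.mem_append.mp hmem with hm | hm
    · rcases List.mem_append.mp hm with hm' | hm'
      · revert hm'; decide
      · exact pv_esc_noNL h hm'
    · revert hm; decide
  | list its =>
    intro l hl
    rcases (by simpa [pvRender] using hl :
      l = "\\begin{itemize}[leftmargin=*]" ∨ (∃ x ∈ its, "\\item " ++ pvLatexEscape x = l) ∨
        l = "\\end{itemize}") with h' | ⟨x, hx, h'⟩ | h'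
    · subst h'; decide
    · subst h'
      simp only [String.toList_append]
      intro hmem
      rcases List.mem_append.mp hmem with hm | hm
      · revert hm; decide
      · exact pv_esc_noNL (h x hx) hm
    · subst h'; decide
  | para ls =>
    intro l hl
    rcases (by simpa [pvRender] using hl : l = pvLatexEscape (PySem.Str.strip (PySem.Str.join " " ls)) ∨ l = "") with h' | h'
    · subst h'; exact pv_esc_noNL (pv_strip_noNL (pv_join_space_noNL h))
    · subst h'; simp

lemma pvStepB_OK {d : List PvBlock} {c : Option PvBlock} {raw : String}
    (h1 : pvOK (pvR d)) (h2 : pvCurOK c) (hr : '\n' ∉ raw.toList) :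
    pvOK (pvR (pvStepB (d, c) raw).1) ∧ pvCurOK (pvStepB (d, c) raw).2 := by
  have hline : '\n' ∉ (PySem.Str.strip raw).toList := pv_strip_noNL hr
  have hx2 : '\n' ∉ (PySem.Str.strip (PySem.Str.slice (PySem.Str.strip raw) (some 2) none)).toList :=
    pv_strip_noNL (pv_slice_noNL 2 hline)
  have hx3 : '\n' ∉ (PySem.Str.strip (PySem.Str.slice (PySem.Str.strip raw) (some 3) none)).toList :=
    pv_strip_noNL (pv_slice_noNL 3 hline)
  have hxitm : pvCurOK (some (PvBlock.list [PySem.Str.strip (PySem.Str.slice (PySem.Str.strip raw) (some 2) none)])) := by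
    intro l hl
    rcases (by simpa using hl : l = PySem.Str.strip (PySem.Str.slice (PySem.Str.strip raw) (some 2) none)) with h
    subst h; exact hx2
  have hxpar : pvCurOK (some (PvBlock.para [PySem.Str.strip raw])) := by
    intro l hl
    rcases (by simpa using hl : l = PySem.Str.strip raw) with h
    subst h; exact hline
  have hclose : ∀ b : PvBlock, pvCurOK (some b) → pvOK (pvR (d ++ [b])) := by
    intro b hb
    rw [pvR_append]
    exact pvOK_append h1 (pvRender_OK hb)
  by_cases hb1 : PySem.Str.strip raw = ""
  · rcases c with _ | (t | its | ls) <;> simp only [pvStepB, hb1, if_pos]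
    · exact ⟨h1, h2⟩
    · exact ⟨h1, h2⟩
    · exact ⟨h1, h2⟩
    · exact ⟨hclose _ h2, trivial⟩
  · by_cases hb2 : PySem.Str.startswith (PySem.Str.strip raw) "## " = true
    · rcases c with _ | (t | its | ls) <;>
        simp only [pvStepB, hb1, hb2, if_pos, if_neg, if_false]
      · refine ⟨?_, trivial⟩
        rw [pvR_append]
        exact pvOK_append h1 (pvRender_OK (by exact hx3))
      · refine ⟨?_, trivial⟩
        rw [pvR_append, pvR_append]
        exact pvOK_append (pvOK_append h1 (pvRender_OK h2)) (pvRender_OK (by exact hx3))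
      · refine ⟨?_, trivial⟩
        rw [pvR_append, pvR_append]
        exact pvOK_append (pvOK_append h1 (pvRender_OK h2)) (pvRender_OK (by exact hx3))
      · refine ⟨?_, trivial⟩
        rw [pvR_append, pvR_append]
        exact pvOK_append (pvOK_append h1 (pvRender_OK h2)) (pvRender_OK (by exact hx3))
    · by_cases hb3 : (PySem.Str.startswith (PySem.Str.strip raw) "- " ||
          PySem.Str.startswith (PySem.Str.strip raw) "* ") = true
      · rcases c with _ | (t | its | ls) <;>
          simp only [pvStepB, hb1, hb2, hb3, if_pos, if_neg, if_false]
        · exact ⟨h1, hxitm⟩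
        · exact ⟨hclose _ h2, hxitm⟩
        · refine ⟨h1, ?_⟩
          intro l hl
          rcases (by simpa using hl :
            l ∈ its ∨ l = PySem.Str.strip (PySem.Str.slice (PySem.Str.strip raw) (some 2) none)) with h | h
          · exact h2 l h
          · subst h; exact hx2
        · exact ⟨hclose _ h2, hxitm⟩
      · rcases c with _ | (t | its | ls) <;>
          simp only [pvStepB, hb1, hb2, hb3, if_neg, if_false]
        · exact ⟨h1, hxpar⟩
        · exact ⟨hclose _ h2, hxpar⟩
        · exact ⟨hclose _ h2, hxpar⟩
        · refine ⟨h1, ?_⟩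
          intro l hl
          rcases (by simpa using hl : l ∈ ls ∨ l = PySem.Str.strip raw) with h | h
          · exact h2 l h
          · subst h; exact hline

lemma pvB_finOK : ∀ (ls : List String) (st : List PvBlock × Option PvBlock),
    pvOK (pvR st.1) → pvCurOK st.2 → (∀ l ∈ ls, '\n' ∉ l.toList) →
    pvOK (pvFinB (ls.foldl pvStepB st)) := by
  intro ls
  induction ls with
  | nil =>
    intro st h1 h2 _
    obtain ⟨d, c⟩ := st
    simp only [List.foldl_nil]
    rcases c with _ | b
    · exact h1
    · show pvOK (pvR (d ++ [b]))
      rw [pvR_append]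
      exact pvOK_append h1 (pvRender_OK h2)
  | cons raw rest ih =>
    intro st h1 h2 hls
    obtain ⟨d, c⟩ := st
    simp only [List.foldl_cons]
    exact ih _ (pvStepB_OK h1 h2 (hls raw (by simp))).1 (pvStepB_OK h1 h2 (hls raw (by simp))).2
      (fun l hl => hls l (by simp [hl]))

-- output monotonicity: both programs only ever append to their emitted lines
lemma pvR_append_list (a b : List PvBlock) : pvR (a ++ b) = pvR a ++ pvR b := by simp [pvR]

lemma pvFlushA_pre (o b : List String) : o <+: (pvFlushA o b).1 := by
  unfold pvFlushA
  split
  · exact List.prefix_append _ _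
  · exact List.prefix_refl _

lemma pvStepA_pre (st : List String × Bool × List String) (raw : String) :
    st.1 <+: (pvStepA st raw).1 := by
  by_cases hb1 : PySem.Str.strip raw = ""
  · simpa only [pvStepA, hb1, if_pos] using pvFlushA_pre st.1 st.2.2
  · by_cases hb2 : PySem.Str.startswith (PySem.Str.strip raw) "## " = true
    · simp only [pvStepA, hb1, hb2, if_pos, if_neg, if_false]
      refine List.IsPrefix.trans ?_ (List.prefix_append _ _)
      refine List.IsPrefix.trans ?_ (pvFlushA_pre _ _)
      split
      · exact List.prefix_append _ _
      · exact List.prefix_refl _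
    · by_cases hb3 : (PySem.Str.startswith (PySem.Str.strip raw) "- " ||
          PySem.Str.startswith (PySem.Str.strip raw) "* ") = true
      · by_cases hil : st.2.1 = true
        · simp only [pvStepA, hb1, hb2, hb3, hil, if_pos, if_neg, if_false, if_true]
          exact List.prefix_append _ _
        · simp only [pvStepA, hb1, hb2, hb3, hil, if_pos, if_neg, if_false]
          exact (pvFlushA_pre _ _).trans (List.prefix_append _ _)
      · simp only [pvStepA, hb1, hb2, hb3, if_neg, if_false]
        exact List.prefix_refl _

lemma pvA_pre : ∀ (ls : List String) (st : List String × Bool × List String),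
    st.1 <+: pvFinA (ls.foldl pvStepA st) := by
  intro ls
  induction ls with
  | nil =>
    intro st
    simp only [List.foldl_nil]
    unfold pvFinA
    split
    · exact (pvFlushA_pre _ _).trans (List.prefix_append _ _)
    · exact pvFlushA_pre _ _
  | cons raw rest ih =>
    intro st
    simp only [List.foldl_cons]
    exact (pvStepA_pre st raw).trans (ih (pvStepA st raw))

lemma pvStepB_pre (st : List PvBlock × Option PvBlock) (raw : String) :
    st.1 <+: (pvStepB st raw).1 := by
  obtain ⟨d, c⟩ := st
  by_cases hb1 : PySem.Str.strip raw = ""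
  · rcases c with _ | (t | its | ls) <;> simp only [pvStepB, hb1, if_pos] <;>
      first
        | exact List.prefix_refl _
        | exact List.prefix_append _ _
  · by_cases hb2 : PySem.Str.startswith (PySem.Str.strip raw) "## " = true
    · rcases c with _ | (t | its | ls) <;>
        simp only [pvStepB, hb1, hb2, if_pos, if_neg, if_false] <;>
        first
          | exact List.prefix_append _ _
          | exact (List.prefix_append _ _).trans (List.prefix_append _ _)
    · by_cases hb3 : (PySem.Str.startswith (PySem.Str.strip raw) "- " ||
          PySem.Str.startswith (PySem.Str.strip raw) "* ") = true
      · rcases c with _ | (t | its | ls) <;>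
          simp only [pvStepB, hb1, hb2, hb3, if_pos, if_neg, if_false] <;>
          first
            | exact List.prefix_refl _
            | exact List.prefix_append _ _
      · rcases c with _ | (t | its | ls) <;>
          simp only [pvStepB, hb1, hb2, hb3, if_neg, if_false] <;>
          first
            | exact List.prefix_refl _
            | exact List.prefix_append _ _

lemma pvR_mono {a b : List PvBlock} (h : a <+: b) : pvR a <+: pvR b := by
  obtain ⟨t, rfl⟩ := h
  rw [pvR_append_list]
  exact List.prefix_append _ _

lemma pvB_pre : ∀ (ls : List String) (st : List PvBlock × Option PvBlock),
    pvR st.1 <+: pvFinB (ls.foldl pvStepB st) := by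
  intro ls
  induction ls with
  | nil =>
    intro st
    obtain ⟨d, c⟩ := st
    simp only [List.foldl_nil]
    rcases c with _ | b
    · exact List.prefix_refl _
    · show pvR d <+: pvR (d ++ [b])
      exact pvR_mono (List.prefix_append _ _)
  | cons raw rest ih =>
    intro st
    simp only [List.foldl_cons]
    exact (pvR_mono (pvStepB_pre st raw)).trans (ih (pvStepB st raw))

-- join "\n" is injective on nonempty lists of newline-free lines
lemma pv_join_inj {xs ys : List String} (hx : pvOK xs) (hy : pvOK ys) (hx0 : xs ≠ [])
    (hy0 : ys ≠ []) (h : PySem.Str.join "\n" xs = PySem.Str.join "\n" ys) : xs = ys := by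
  have h' := congrArg String.toList h
  rw [PySem.Str.toList_join, PySem.Str.toList_join] at h'
  have h'' : ['\n'].intercalate (xs.map String.toList) = ['\n'].intercalate (ys.map String.toList) := h'
  have hxs := List.splitOn_intercalate (xs.map String.toList) '\n'
    (by intro l hl; rcases List.mem_map.mp hl with ⟨a, ha, rfl⟩; exact hx a ha) (by simpa using hx0)
  have hys := List.splitOn_intercalate (ys.map String.toList) '\n'
    (by intro l hl; rcases List.mem_map.mp hl with ⟨a, ha, rfl⟩; exact hy a ha) (by simpa using hy0)
  have hmap : xs.map String.toList = ys.map String.toList := by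
    rw [← hxs, ← hys, h'']
  exact List.map_injective_iff.mpr (fun a b hab => String.toList_injective hab) hmap

lemma pv_item_ne_end (x : String) : "\\item " ++ x ≠ "\\end{itemize}" := by
  intro h
  have h' := congrArg String.toList h
  rw [String.toList_append] at h'
  rw [show "\\item ".toList = ['\\', 'i', 't', 'e', 'm', ' '] from rfl] at h'
  rw [show "\\end{itemize}".toList =
    ['\\', 'e', 'n', 'd', '{', 'i', 't', 'e', 'm', 'i', 'z', 'e', '}'] from rfl] at h'
  simp at h'


lemma pvTight : ∀ (ls : List String) (out : List String) (il : Bool) (buf : List String)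
    (done : List PvBlock) (cur : Option PvBlock),
    pvRel out il buf done cur →
    pvCond il buf (ls.map pvClassify) = true →
    (pvFinA (ls.foldl pvStepA (out, il, buf)) ≠ pvFinB (ls.foldl pvStepB (done, cur)) ∧
     pvFinA (ls.foldl pvStepA (out, il, buf)) ≠ [] ∧
     pvFinB (ls.foldl pvStepB (done, cur)) ≠ []) := by
  intro ls
  induction ls with
  | nil =>
    intro out il buf done cur hrel hcond
    simp only [List.foldl_nil]
    rcases hrel with ⟨hil, hbuf, hcur, hR⟩ | ⟨hil, hbuf, hcur, hR⟩ |
      ⟨items, hil, hbuf, hcur, hout⟩ | ⟨hil, hbuf, hcur, hR⟩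
    · subst hil hbuf
      simp [pvCond, pvScan] at hcond
    · subst hil
      simp [pvCond, pvScan] at hcond
    · subst hil hbuf
      simp [pvCond, pvScan] at hcond
    · -- end of input while a paragraph is buffered inside an open list
      subst hil hcur
      have hA : pvFinA (out, true, buf) =
          out ++ [pvLatexEscape (PySem.Str.strip (PySem.Str.join " " buf)), "", "\\end{itemize}"] := by
        simp [pvFinA, pvFlushA_ne _ hbuf]
      have hB : pvFinB (done, some (PvBlock.para buf)) =
          out ++ ["\\end{itemize}", pvLatexEscape (PySem.Str.strip (PySem.Str.join " " buf)), ""] := by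
        show pvR (done ++ [PvBlock.para buf]) = _
        rw [pvR_append, hR]
        simp [pvRender]
      refine ⟨?_, by simp [hA], by simp [hB]⟩
      rw [hA, hB]
      intro h
      have h' := List.append_cancel_left h
      simp only [List.cons.injEq, and_true] at h'
      exact absurd h'.2.2 (by decide)
  | cons raw rest ih =>
    intro out il buf done cur hrel hcond
    simp only [List.foldl_cons, List.map_cons] at hcond ⊢
    by_cases h1 : PySem.Str.strip raw = ""
    · -- blank line
      have hcls : pvClassify raw = PvCls.blank := by
        unfold pvClassify; rw [if_pos ((pv_blank_iff raw).mpr h1)]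
      rw [hcls] at hcond
      rcases hrel with ⟨hil, hbuf, hcur, hR⟩ | ⟨hil, hbuf, hcur, hR⟩ |
        ⟨items, hil, hbuf, hcur, hout⟩ | ⟨hil, hbuf, hcur, hR⟩
      · subst hil hbuf hcur
        simp only [pvStepA, pvStepB, h1, if_pos, pvFlushA_nil]
        exact ih out false [] done none (Or.inl ⟨rfl, rfl, rfl, hR⟩)
          (by simpa [pvCond, pvScan] using hcond)
      · subst hil hcur
        simp only [pvStepA, pvStepB, h1, if_pos, pvFlushA_ne _ hbuf]
        exact ih _ false [] _ none (Or.inl ⟨rfl, rfl, rfl, by simp [pvR_append, pvR_append2, pvRender, hR]⟩)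
          (by simpa [pvCond, pvScan] using hcond)
      · subst hil hbuf hcur
        simp only [pvStepA, pvStepB, h1, if_pos, pvFlushA_nil]
        exact ih out true [] done (some (PvBlock.list items))
          (Or.inr (Or.inr (Or.inl ⟨items, rfl, rfl, rfl, hout⟩)))
          (by simpa [pvCond, pvScan] using hcond)
      · -- breaker: the buffered in-list paragraph is flushed inside the list by a blank line
        subst hil hcur
        simp only [pvStepA, pvStepB, h1, Bool.false_eq_true, if_pos, if_false, pvFlushA_ne _ hbuf]
        obtain ⟨γ, hγ⟩ := pvA_pre rest
          (out ++ [pvLatexEscape (PySem.Str.strip (PySem.Str.join " " buf)), ""], true, [])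
        obtain ⟨δ, hδ⟩ := pvB_pre rest (done ++ [PvBlock.para buf], none)
        have hRB : pvR (done ++ [PvBlock.para buf]) =
            out ++ ["\\end{itemize}", pvLatexEscape (PySem.Str.strip (PySem.Str.join " " buf)), ""] := by
          rw [pvR_append, hR]
          simp [pvRender]
        refine ⟨?_, ?_, ?_⟩
        · intro h
          rw [← hγ, ← hδ, hRB] at h
          rw [List.append_assoc, List.append_assoc] at h
          have h' := List.append_cancel_left h
          simp only [List.cons_append, List.nil_append, List.cons.injEq] at h'
          exact absurd (h'.2.1.trans h'.1) (by decide)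
        · intro h; rw [← hγ] at h; simp at h
        · intro h; rw [← hδ, hRB] at h; simp at h
    · by_cases h2 : PySem.Str.startswith (PySem.Str.strip raw) "## " = true
      · -- '## ' heading
        have hcls : pvClassify raw = PvCls.sec := by
          unfold pvClassify
          rw [if_neg (fun h => h1 ((pv_blank_iff raw).mp h)), if_pos ((pv_pref_iff raw "## ").mpr h2)]
        rw [hcls] at hcond
        rcases hrel with ⟨hil, hbuf, hcur, hR⟩ | ⟨hil, hbuf, hcur, hR⟩ |
          ⟨items, hil, hbuf, hcur, hout⟩ | ⟨hil, hbuf, hcur, hR⟩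
        · subst hil hbuf hcur
          simp only [pvStepA, pvStepB, h1, h2, if_pos, if_neg, if_false, pvFlushA_nil]
          simp only [if_neg (by simp [h1] : ¬ (PySem.Str.strip raw = "")), Bool.false_eq_true,
            if_false, pvFlushA_nil]
          exact ih _ false [] _ none (Or.inl ⟨rfl, rfl, rfl, by simp [pvR_append, pvR_append2, pvRender, hR]⟩)
            (by simpa [pvCond, pvScan] using hcond)
        · subst hil hcur
          simp only [pvStepA, pvStepB, h1, h2, if_pos, if_neg, if_false, pvFlushA_ne _ hbuf]
          exact ih _ false [] _ none (Or.inl ⟨rfl, rfl, rfl, by simp [pvR_append, pvR_append2, pvRender, hR]⟩)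
            (by simpa [pvCond, pvScan] using hcond)
        · subst hil hbuf hcur
          simp only [pvStepA, pvStepB, h1, h2, if_pos, if_neg, if_false, pvFlushA_nil]
          exact ih _ false [] _ none
            (Or.inl ⟨rfl, rfl, rfl, by simp [pvR_append, pvR_append2, pvRender, hout]⟩)
            (by simpa [pvCond, pvScan] using hcond)
        · subst hil hcur
          simp only [pvStepA, pvStepB, h1, h2, if_pos, if_neg, if_false, pvFlushA_ne _ hbuf]
          exact ih _ false [] _ none (Or.inl ⟨rfl, rfl, rfl, by simp [pvR_append, pvR_append2, pvRender, hR]⟩)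
            (by simpa [pvCond, hbuf, pvInEp] using hcond)
      · by_cases h3 : (PySem.Str.startswith (PySem.Str.strip raw) "- " ||
            PySem.Str.startswith (PySem.Str.strip raw) "* ") = true
        · -- list item
          have hcls : pvClassify raw = PvCls.item := by
            unfold pvClassify
            rw [if_neg (fun h => h1 ((pv_blank_iff raw).mp h)),
              if_neg (fun h => h2 ((pv_pref_iff raw "## ").mp h)),
              if_pos (((Bool.or_eq_true _ _).mp h3).imp (pv_pref_iff raw "- ").mpr
                (pv_pref_iff raw "* ").mpr)]
          rw [hcls] at hcond
          rcases hrel with ⟨hil, hbuf, hcur, hR⟩ | ⟨hil, hbuf, hcur, hR⟩ |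
            ⟨items, hil, hbuf, hcur, hout⟩ | ⟨hil, hbuf, hcur, hR⟩
          · subst hil hbuf hcur
            simp only [pvStepA, pvStepB, h1, h2, h3, if_pos, if_neg, if_false, pvFlushA_nil]
            exact ih _ true [] _ (some (PvBlock.list _))
              (Or.inr (Or.inr (Or.inl ⟨_, rfl, rfl, rfl, by simp [hR]⟩)))
              (by simpa [pvCond, pvScan] using hcond)
          · subst hil hcur
            simp only [pvStepA, pvStepB, h1, h2, h3, if_pos, if_neg, if_false, pvFlushA_ne _ hbuf]
            exact ih _ true [] _ (some (PvBlock.list _))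
              (Or.inr (Or.inr (Or.inl ⟨_, rfl, rfl, rfl, by
                simp [pvR_append, pvR_append2, pvRender, hR]⟩)))
              (by simpa [pvCond, pvScan] using hcond)
          · subst hil hbuf hcur
            simp only [pvStepA, pvStepB, h1, h2, h3, if_pos, if_neg, if_false]
            exact ih _ true [] _ (some (PvBlock.list _))
              (Or.inr (Or.inr (Or.inl ⟨_, rfl, rfl, rfl, by simp [hout]⟩)))
              (by simpa [pvCond, pvScan] using hcond)
          · -- breaker: a new item arrives while an in-list paragraph is buffered
            subst hil hcur
            simp only [pvStepA, pvStepB, h1, h2, h3, Bool.false_eq_true, if_pos, if_neg, if_false, if_true]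
            obtain ⟨γ, hγ⟩ := pvA_pre rest
              (out ++ ["\\item " ++ pvLatexEscape (PySem.Str.strip (PySem.Str.slice (PySem.Str.strip raw) (some 2) none))], true, buf)
            obtain ⟨δ, hδ⟩ := pvB_pre rest
              (done ++ [PvBlock.para buf],
               some (PvBlock.list [PySem.Str.strip (PySem.Str.slice (PySem.Str.strip raw) (some 2) none)]))
            have hRB : pvR (done ++ [PvBlock.para buf]) =
                out ++ ["\\end{itemize}", pvLatexEscape (PySem.Str.strip (PySem.Str.join " " buf)), ""] := by
              rw [pvR_append, hR]
              simp [pvRender]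
            refine ⟨?_, ?_, ?_⟩
            · intro h
              rw [← hγ, ← hδ, hRB] at h
              rw [List.append_assoc, List.append_assoc] at h
              have h' := List.append_cancel_left h
              simp only [List.cons_append, List.nil_append, List.cons.injEq] at h'
              exact absurd h'.1 (pv_item_ne_end _)
            · intro h; rw [← hγ] at h; simp at h
            · intro h; rw [← hδ, hRB] at h; simp at h
        · -- plain text line
          have hcls : pvClassify raw = PvCls.text := by
            unfold pvClassify
            rw [if_neg (fun h => h1 ((pv_blank_iff raw).mp h)),
              if_neg (fun h => h2 ((pv_pref_iff raw "## ").mp h)),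
              if_neg (fun h => h3 ((Bool.or_eq_true _ _).mpr
                (h.imp (pv_pref_iff raw "- ").mp (pv_pref_iff raw "* ").mp)))]
          rw [hcls] at hcond
          rcases hrel with ⟨hil, hbuf, hcur, hR⟩ | ⟨hil, hbuf, hcur, hR⟩ |
            ⟨items, hil, hbuf, hcur, hout⟩ | ⟨hil, hbuf, hcur, hR⟩
          · subst hil hbuf hcur
            simp only [pvStepA, pvStepB, h1, h2, h3, if_pos, if_neg, if_false]
            exact ih _ false [PySem.Str.strip raw] _ (some (PvBlock.para _))
              (Or.inr (Or.inl ⟨rfl, by simp, rfl, hR⟩))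
              (by simpa [pvCond, pvScan] using hcond)
          · subst hil hcur
            simp only [pvStepA, pvStepB, h1, h2, h3, if_pos, if_neg, if_false]
            exact ih _ false (buf ++ [PySem.Str.strip raw]) _ (some (PvBlock.para _))
              (Or.inr (Or.inl ⟨rfl, by simp, rfl, hR⟩))
              (by simpa [pvCond, pvScan] using hcond)
          · subst hil hbuf hcur
            simp only [pvStepA, pvStepB, h1, h2, h3, if_pos, if_neg, if_false]
            exact ih _ true [PySem.Str.strip raw] _ (some (PvBlock.para _))
              (Or.inr (Or.inr (Or.inr ⟨rfl, by simp, rfl, by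
                simp [pvR_append, pvR_append2, pvRender, hout]⟩)))
              (by simpa [pvCond, pvScan, pvInEp] using hcond)
          · subst hil hcur
            simp only [pvStepA, pvStepB, h1, h2, h3, if_pos, if_neg, if_false]
            exact ih _ true (buf ++ [PySem.Str.strip raw]) _ (some (PvBlock.para _))
              (Or.inr (Or.inr (Or.inr ⟨rfl, by simp, rfl, hR⟩)))
              (by simpa [pvCond, hbuf, pvInEp] using hcond)

-- ===== VERDICT (by name: the statement is the Claim_ definition above) =====
theorem parse_summary_to_latex_py_spec : Claim_unchanged_parse_summary_to_latex_py := by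
  intro summary _
  unfold Spec_parse_summary_to_latex_py
  intro hD
  have hnd : pvScan false ((PySem.Str.splitlines summary).map pvClassify) = false := by
    revert hD; unfold D_parse_summary_to_latex_py
    cases pvScan false ((PySem.Str.splitlines summary).map pvClassify) <;> simp
  have hA : parse_summary_to_latex_py summary =
      PySem.Str.join "\n" (pvFinA ((PySem.Str.splitlines summary).foldl pvStepA ([], false, []))) := by
    unfold parse_summary_to_latex_py pvFinA
    simp only [List.foldl_map]
    rw [PySem.List.foldl_congr_mem _ _ pvStepA _ (fun acc x _ => pvStepA_rstrip acc x)]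
  have hB : parse_summary_to_latex_py_alt summary =
      PySem.Str.join "\n" (pvFinB ((PySem.Str.splitlines summary).foldl pvStepB ([], none))) := by
    unfold parse_summary_to_latex_py_alt pvFinB
    rcases (PySem.Str.splitlines summary).foldl pvStepB ([], none) with ⟨d, c⟩
    cases c <;> simp [PySem.List.foldl_append_eq_flatMap, pvR, List.flatMap_def]
  rw [hA, hB]
  congr 1
  exact pvMain _ [] false [] [] none (Or.inl ⟨rfl, rfl, rfl, rfl⟩)
    (by simpa [pvCond] using hnd)

set_option maxRecDepth 100000 in
theorem parse_summary_to_latex_py_changed : Claim_changed_parse_summary_to_latex_py := by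
  unfold Claim_changed_parse_summary_to_latex_py; decide


theorem parse_summary_to_latex_py_tight : Claim_exact_parse_summary_to_latex_py := by
  intro summary _ hD
  unfold D_parse_summary_to_latex_py at hD
  have hA : parse_summary_to_latex_py summary =
      PySem.Str.join "\n" (pvFinA ((PySem.Str.splitlines summary).foldl pvStepA ([], false, []))) := by
    unfold parse_summary_to_latex_py pvFinA
    simp only [List.foldl_map]
    rw [PySem.List.foldl_congr_mem _ _ pvStepA _ (fun acc x _ => pvStepA_rstrip acc x)]
  have hB : parse_summary_to_latex_py_alt summary =
      PySem.Str.join "\n" (pvFinB ((PySem.Str.splitlines summary).foldl pvStepB ([], none))) := by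
    unfold parse_summary_to_latex_py_alt pvFinB
    rcases (PySem.Str.splitlines summary).foldl pvStepB ([], none) with ⟨d, c⟩
    cases c <;> simp [pvR, List.flatMap_def]
  rw [hA, hB]
  intro h
  have hls : ∀ l ∈ PySem.Str.splitlines summary, '\n' ∉ l.toList := pv_splitlines_noNL summary
  have hokA : pvOK (pvFinA ((PySem.Str.splitlines summary).foldl pvStepA ([], false, []))) :=
    pvA_finOK _ _ (by intro l hl; simp at hl) (by intro l hl; simp at hl) hls
  have hokB : pvOK (pvFinB ((PySem.Str.splitlines summary).foldl pvStepB ([], none))) :=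
    pvB_finOK _ _ (by intro l hl; simp [pvR] at hl) trivial hls
  obtain ⟨hne, hA0, hB0⟩ := pvTight (PySem.Str.splitlines summary) [] false [] [] none
    (Or.inl ⟨rfl, rfl, rfl, rfl⟩) (by simpa [pvCond] using hD)
  exact hne (pv_join_inj hokA hokB hA0 hB0 h)
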